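-- pv_equiv track=rewrite | github.com/takashi4233/leetcode | python/2373_largestLocal/solution.py | largestLocal2
-- ===== SOURCE A (Python) =====
-- from typing import List
--
-- def largestLocal2(grid: List[List[int]]) -> List[List[int]]:
--     res = []
--     matrix_size = len(grid)
--     for idx_y in range(matrix_size-2):
--         low = []
--         for idx_x in range(matrix_size-2):
--             target = []
--             for y in range(3):
--                 for x in range(3):
--                     target.append(grid[y+idx_y][x+idx_x])
--             low.append(max(target))
--         res.append(low)
--     return res
-- ===== SOURCE B (Python) =====
-- def largestLocal2(grid):
--     size = len(grid)
--     w = size - 2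
--     # horizontal pass: window maxima of width 3 along each row
--     H = [[max(row[c], row[c + 1], row[c + 2]) for c in range(w)] for row in grid]
--     # vertical pass: window maxima of height 3 over the intermediate table
--     return [[max(H[r][c], H[r + 1][c], H[r + 2][c]) for c in range(w)] for r in range(w)]
-- ===== Notes on version B (the rewrite author's own statement) =====
-- stated objective: faster
-- what changed: Replaces the flat 3x3 gather per cell (building a 9-element list and taking its max) with a separable two-pass scheme: first a table of horizontal width-3 row maxima, then vertical height-3 maxima over that table (6 comparisons per cell instead of a 9-element list build+max).
import Mathlib
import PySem

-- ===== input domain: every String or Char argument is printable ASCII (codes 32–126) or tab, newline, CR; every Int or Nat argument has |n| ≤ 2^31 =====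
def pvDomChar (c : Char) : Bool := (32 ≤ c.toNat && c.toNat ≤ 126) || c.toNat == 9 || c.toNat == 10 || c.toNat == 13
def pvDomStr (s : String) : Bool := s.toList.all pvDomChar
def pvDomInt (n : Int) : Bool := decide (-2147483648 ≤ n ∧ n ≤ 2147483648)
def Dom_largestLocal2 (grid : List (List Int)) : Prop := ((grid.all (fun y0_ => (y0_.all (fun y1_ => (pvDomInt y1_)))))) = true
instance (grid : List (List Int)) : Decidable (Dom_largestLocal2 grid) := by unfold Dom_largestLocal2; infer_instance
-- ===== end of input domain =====

-- B replaces A's flat 3x3 gather per cell by a separable two-pass scheme (horizontal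
-- width-3 row maxima into a table, then vertical height-3 maxima over it): fewer
-- reads per cell and no per-cell list allocation.

-- ===== PORT A =====
def largestLocal2 (grid : List (List Int)) : List (List Int) :=
  let n : Int := grid.length
  (PySem.List.pyRange 0 (n - 2) 1).foldl (fun res idx_y =>
    res ++ [(PySem.List.pyRange 0 (n - 2) 1).foldl (fun low idx_x =>
      let target := (PySem.List.pyRange 0 3 1).foldl (fun t y =>
        (PySem.List.pyRange 0 3 1).foldl (fun t x =>
          t ++ [PySem.List.pyGetD (PySem.List.pyGetD grid (y + idx_y) []) (x + idx_x) 0]) t) []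
      low ++ [(PySem.List.max? target (fun v => v)).getD 0]) []]) []

-- ===== PORT B =====
def largestLocal2_alt (grid : List (List Int)) : List (List Int) :=
  let n : Int := grid.length
  let w : Int := n - 2
  let H := grid.map (fun row => (PySem.List.pyRange 0 w 1).map (fun c =>
    max (max (PySem.List.pyGetD row c 0) (PySem.List.pyGetD row (c + 1) 0))
        (PySem.List.pyGetD row (c + 2) 0)))
  (PySem.List.pyRange 0 w 1).map (fun r => (PySem.List.pyRange 0 w 1).map (fun c =>
    max (max (PySem.List.pyGetD (PySem.List.pyGetD H r []) c 0)
             (PySem.List.pyGetD (PySem.List.pyGetD H (r + 1) []) c 0))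
        (PySem.List.pyGetD (PySem.List.pyGetD H (r + 2) []) c 0)))

-- ===== PRECONDITION & SPEC =====
-- A indexes every row at columns up to len(grid)-1; on a ragged grid with some row
-- shorter than len(grid) (when len(grid) ≥ 3) it raises IndexError, so Pre_ excludes
-- exactly those inputs (B raises there too).
def Pre_largestLocal2 (grid : List (List Int)) : Prop :=
  grid.length < 3 ∨ ∀ row ∈ grid, grid.length ≤ row.length
instance (grid : List (List Int)) : Decidable (Pre_largestLocal2 grid) := by
  unfold Pre_largestLocal2; infer_instance
def pvWitness_largestLocal2 : List (List Int) := [[1, 2, 3], [4, 5, 6], [7, 8, 9]]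
def Spec_largestLocal2 (grid : List (List Int)) (out : List (List Int)) : Prop := out = largestLocal2_alt grid
instance (grid : List (List Int)) (out : List (List Int)) : Decidable (Spec_largestLocal2 grid out) := by unfold Spec_largestLocal2; infer_instance

-- ===== CLAIM (what is proved, stated in full; the proofs are below) =====
def Claim_equal_largestLocal2 : Prop := ∀ (grid : List (List Int)), Dom_largestLocal2 grid → Pre_largestLocal2 grid → Spec_largestLocal2 grid (largestLocal2 grid)

-- ===== LEMMAS AND PROOFS =====

-- indexing a mapped list at a valid nonnegative index
theorem pyGetD_map_getElem' {α β : Type} (f : α → β) (xs : List α) (i : Int) (d : β)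
    (h0 : 0 ≤ i) (h1 : i < xs.length) :
    PySem.List.pyGetD (xs.map f) i d = f (xs[i.toNat]'(by omega)) := by
  rw [PySem.List.pyGetD_eq_getElem (xs.map f) d h0 (by simpa using h1)]
  simp

theorem largestLocal2_eq_alt (grid : List (List Int))
    (hpre : Pre_largestLocal2 grid) :
    largestLocal2 grid = largestLocal2_alt grid := by
  unfold Pre_largestLocal2 at hpre
  by_cases h3 : grid.length < 3
  · have hnil : PySem.List.pyRange 0 ((grid.length : Int) - 2) 1 = [] :=
      PySem.List.pyRange_one_eq_nil (by omega)
    simp [largestLocal2, largestLocal2_alt, hnil]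
  · have hlen := hpre.resolve_left h3
    have h3' : 3 ≤ grid.length := by omega
    unfold largestLocal2 largestLocal2_alt
    simp only [PySem.List.foldl_append_singleton_eq_map, List.nil_append]
    apply List.map_congr_left
    intro r hr
    rw [PySem.List.mem_pyRange_one] at hr
    apply List.map_congr_left
    intro c hc
    rw [PySem.List.mem_pyRange_one] at hc
    obtain ⟨hr0, hr2⟩ := hr
    obtain ⟨hc0, hc2⟩ := hc
    have hrange3 : PySem.List.pyRange 0 3 1 = [0, 1, 2] := by decide
    rw [hrange3]
    have e1r : (1 : Int) + r = r + 1 := by ring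
    have e2r : (2 : Int) + r = r + 2 := by ring
    have e1c : (1 : Int) + c = c + 1 := by ring
    have e2c : (2 : Int) + c = c + 2 := by ring
    simp only [List.foldl_cons, List.foldl_nil, List.map_cons, List.map_nil,
      List.cons_append, List.nil_append, zero_add, e1r, e2r, e1c, e2c]
    rw [PySem.List.max?_id_cons]
    simp only [Option.getD_some, List.foldl_cons, List.foldl_nil]
    rw [pyGetD_map_getElem' _ grid r [] hr0 (by push_cast; omega),
        pyGetD_map_getElem' _ grid (r + 1) [] (by omega) (by push_cast; omega),
        pyGetD_map_getElem' _ grid (r + 2) [] (by omega) (by push_cast; omega),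
        PySem.List.pyGetD_eq_getElem grid [] hr0 (by push_cast; omega),
        PySem.List.pyGetD_eq_getElem grid [] (show (0:Int) ≤ r + 1 by omega) (by push_cast; omega),
        PySem.List.pyGetD_eq_getElem grid [] (show (0:Int) ≤ r + 2 by omega) (by push_cast; omega)]
    rw [PySem.List.pyGetD_map_pyRange_of_nonneg _ _ c 0 hc0 hc2,
        PySem.List.pyGetD_map_pyRange_of_nonneg _ _ c 0 hc0 hc2,
        PySem.List.pyGetD_map_pyRange_of_nonneg _ _ c 0 hc0 hc2]
    simp [max_assoc]

-- ===== VERDICT (by name: the statement is the Claim_ definition above) =====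
theorem largestLocal2_spec : Claim_equal_largestLocal2 := by
  intro grid _ hpre
  unfold Spec_largestLocal2
  exact largestLocal2_eq_alt grid hpre
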